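-- pv_equiv track=rewrite | github.com/Regenshire/iMomir | app.py | parse_chaos_pack_types_config
-- ===== SOURCE A (Python) =====
-- CHAOS_PACK_TYPE_OPTIONS = [
--     {"value": "core", "label": "Core Booster"},
--     {"value": "default", "label": "Booster"},
--     {"value": "set", "label": "Set Booster"},
--     {"value": "draft", "label": "Draft Booster"},
--     {"value": "play", "label": "Play Booster"},
--     {"value": "collector", "label": "Collector Booster"},
--     {"value": "collector-special", "label": "Collector Special Booster"},
--     {"value": "jumpstart", "label": "Jumpstart Booster"},
--     {"value": "jumpstart-v2", "label": "Jumpstart Booster"},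
--     {"value": "premium", "label": "Premium Booster"},
--     {"value": "vip", "label": "VIP Booster"},
--     {"value": "six", "label": "Six Card Booster"},
--     {"value": "collector-sample", "label": "Collector Sample Pack (2 cards)"},
-- ]
--
-- ALLOWED_CHAOS_BOOSTER_TYPES = {
--     item["value"]
--     for item in CHAOS_PACK_TYPE_OPTIONS
-- }
--
-- def parse_chaos_pack_types_config(raw_value):
--     allowed_pack_types = {item["value"] for item in CHAOS_PACK_TYPE_OPTIONS}
--
--     selected_pack_types = set()
--     for item in (raw_value or "").split(","):
--         normalized_item = (item or "").strip().lower()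
--         if normalized_item and normalized_item in allowed_pack_types:
--             selected_pack_types.add(normalized_item)
--
--     if not selected_pack_types:
--         selected_pack_types = set(ALLOWED_CHAOS_BOOSTER_TYPES)
--
--     return selected_pack_types
-- ===== SOURCE B (Python) =====
-- CHAOS_PACK_TYPE_OPTIONS = [
--     {"value": "core", "label": "Core Booster"},
--     {"value": "default", "label": "Booster"},
--     {"value": "set", "label": "Set Booster"},
--     {"value": "draft", "label": "Draft Booster"},
--     {"value": "play", "label": "Play Booster"},
--     {"value": "collector", "label": "Collector Booster"},
--     {"value": "collector-special", "label": "Collector Special Booster"},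
--     {"value": "jumpstart", "label": "Jumpstart Booster"},
--     {"value": "jumpstart-v2", "label": "Jumpstart Booster"},
--     {"value": "premium", "label": "Premium Booster"},
--     {"value": "vip", "label": "VIP Booster"},
--     {"value": "six", "label": "Six Card Booster"},
--     {"value": "collector-sample", "label": "Collector Sample Pack (2 cards)"},
-- ]
--
-- ALLOWED_CHAOS_BOOSTER_TYPES = {
--     item["value"]
--     for item in CHAOS_PACK_TYPE_OPTIONS
-- }
--
--
-- def parse_chaos_pack_types_config(raw_value):
--     # Single character-level pass: a small state machine tokenizes, trims and
--     # lowercases in one sweep instead of split()/strip()/lower() per token.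
--     selected = set()
--     token = ""    # current token, already left-trimmed, right-trimmed, lowercased
--     pending = ""  # whitespace seen after token text: interior if more text comes, else dropped
--     for ch in (raw_value or "") + ",":
--         if ch == ",":
--             if token in ALLOWED_CHAOS_BOOSTER_TYPES:
--                 selected.add(token)
--             token = ""
--             pending = ""
--         elif ch.isspace():
--             if token:
--                 pending += ch
--         else:
--             token += pending + ch.lower()
--             pending = ""
--     if not selected:
--         selected = set(ALLOWED_CHAOS_BOOSTER_TYPES)
--     return selected
-- ===== Notes on version B (the rewrite author's own statement) =====
-- stated objective: alternative
-- what changed: Replaces the split()/strip()/lower() token pipeline plus membership loop by a single character-level state machine that tokenizes, trims and lowercases in one sweep over the string.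
import Mathlib
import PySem

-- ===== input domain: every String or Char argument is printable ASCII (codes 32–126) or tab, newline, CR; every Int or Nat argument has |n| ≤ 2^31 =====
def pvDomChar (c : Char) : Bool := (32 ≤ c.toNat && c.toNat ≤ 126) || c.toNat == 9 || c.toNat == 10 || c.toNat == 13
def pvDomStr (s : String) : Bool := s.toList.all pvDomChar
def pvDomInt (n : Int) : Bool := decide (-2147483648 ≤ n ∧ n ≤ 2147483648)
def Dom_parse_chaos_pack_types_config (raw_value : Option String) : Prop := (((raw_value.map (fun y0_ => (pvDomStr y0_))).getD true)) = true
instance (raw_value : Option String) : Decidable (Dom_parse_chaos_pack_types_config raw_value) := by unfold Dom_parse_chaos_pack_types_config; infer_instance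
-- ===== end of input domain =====

-- B replaces A's split()/strip()/lower() token pipeline by a single character-level
-- state machine that tokenizes, trims and lowercases in one sweep (objective: alternative, same cost).
-- The Python result is a set; PySem.Set lists carry its elements (compared as a finite set by the harness).

-- the module constant CHAOS_PACK_TYPE_OPTIONS, projected to its "value" fields
def chaosPackTypeValues : List String :=
  ["core", "default", "set", "draft", "play", "collector", "collector-special",
   "jumpstart", "jumpstart-v2", "premium", "vip", "six", "collector-sample"]

-- ===== PORT A =====
def parse_chaos_pack_types_config (raw_value : Option String) : List String :=
  -- allowed_pack_types = {item["value"] for item in CHAOS_PACK_TYPE_OPTIONS}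
  let allowed_pack_types : PySem.Set String := PySem.Set.ofList chaosPackTypeValues
  -- for item in (raw_value or "").split(","): accumulate
  -- split on the literal non-empty separator "," never raises, hence getD
  let selected_pack_types : PySem.Set String :=
    ((PySem.Str.split? (raw_value.getD "") ",").getD []).foldl
      (fun acc item =>
        let normalized_item := PySem.Str.lower (PySem.Str.strip item)
        if normalized_item != "" && PySem.Set.contains allowed_pack_types normalized_item then
          PySem.Set.add acc normalized_item
        else acc)
      PySem.Set.empty
  if selected_pack_types = [] then PySem.Set.ofList chaosPackTypeValues
  else selected_pack_types

-- ===== PORT B =====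
-- state of Source B's scanner: (token, pending, selected); the character loop body
def scanStep (st : List Char × List Char × PySem.Set String) (ch : Char) :
    List Char × List Char × PySem.Set String :=
  if ch = ',' then
    ([], [],
      if PySem.Set.contains (PySem.Set.ofList chaosPackTypeValues) (String.ofList st.1) then
        PySem.Set.add st.2.2 (String.ofList st.1)
      else st.2.2)
  else if PySem.Chars.isspace ch then
    (st.1, if st.1 ≠ [] then st.2.1 ++ [ch] else st.2.1, st.2.2)
  else
    (st.1 ++ st.2.1 ++ [PySem.Chars.lowerChar ch], [], st.2.2)

def parse_chaos_pack_types_config_alt (raw_value : Option String) : List String :=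
  -- for ch in (raw_value or "") + ",":  (iteration over characters, modeled on toList)
  let st := ((raw_value.getD "").toList ++ [',']).foldl scanStep ([], [], PySem.Set.empty)
  let selected := st.2.2
  -- return selected or set(ALLOWED_CHAOS_BOOSTER_TYPES)
  if selected = [] then PySem.Set.ofList chaosPackTypeValues else selected

-- ===== PRECONDITION & SPEC =====
def Spec_parse_chaos_pack_types_config (raw_value : Option String) (out : List String) : Prop := out = parse_chaos_pack_types_config_alt raw_value
instance (raw_value : Option String) (out : List String) : Decidable (Spec_parse_chaos_pack_types_config raw_value out) := by unfold Spec_parse_chaos_pack_types_config; infer_instance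

-- ===== CLAIM (what is proved, stated in full; the proofs are below) =====
def Claim_equal_parse_chaos_pack_types_config : Prop := ∀ (raw_value : Option String), Dom_parse_chaos_pack_types_config raw_value → Spec_parse_chaos_pack_types_config raw_value (parse_chaos_pack_types_config raw_value)

-- ===== LEMMAS AND PROOFS =====

-- lowering a whitespace character is the identity (uppercase letters are not whitespace)
theorem lowerChar_of_isspace (c : Char) (h : PySem.Chars.isspace c = true) :
    PySem.Chars.lowerChar c = c := by
  simp [PySem.Chars.isspace] at h
  simp only [PySem.Chars.lowerChar, PySem.Chars.isupper]
  have hno : ¬ ('A' ≤ c ∧ c ≤ 'Z') := by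
    rintro ⟨h1, h2⟩
    have a : 65 ≤ c.toNat := Nat.succ_le_of_lt h1
    have b : c.toNat ≤ 90 := Fin.mk_le_mk.mp h2
    omega
  rcases Decidable.not_and_iff_not_or_not.mp hno with h1 | h1 <;> simp [h1]

theorem rstrip_cons_nonspace (c : Char) (ds : List Char) (h : PySem.Chars.isspace c = false) :
    PySem.Chars.rstrip (c :: ds) = c :: PySem.Chars.rstrip ds := by
  simp only [PySem.Chars.rstrip, List.reverse_cons, List.dropWhile_append]
  by_cases he : (ds.reverse.dropWhile PySem.Chars.isspace) = [] <;>
    simp [he, h]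

theorem rstrip_cons_space (c : Char) (ds : List Char) (h : PySem.Chars.isspace c = true) :
    PySem.Chars.rstrip (c :: ds) =
      if PySem.Chars.rstrip ds = [] then [] else c :: PySem.Chars.rstrip ds := by
  simp only [PySem.Chars.rstrip, List.reverse_cons, List.dropWhile_append]
  by_cases he : (ds.reverse.dropWhile PySem.Chars.isspace) = [] <;>
    simp [he, h, List.reverse_eq_nil_iff]

-- Source B's scanner over a comma-free block of characters: token ends up as
-- lower(strip(block)) relative to the incoming token/pending state
theorem scan_nocomma (ds : List Char) :
    ∀ (tok pend : List Char) (sel : PySem.Set String),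
    ',' ∉ ds → (∀ c ∈ pend, PySem.Chars.isspace c = true) → (tok = [] → pend = []) →
    ∃ pend',
      ds.foldl scanStep (tok, pend, sel)
        = (tok ++ (if PySem.Chars.rstrip (if tok = [] then PySem.Chars.lstrip ds else ds) = []
                   then []
                   else pend ++ PySem.Chars.lower
                     (PySem.Chars.rstrip (if tok = [] then PySem.Chars.lstrip ds else ds))),
           pend', sel) := by
  induction ds with
  | nil =>
    intro tok pend sel _ _ _
    exact ⟨pend, by simp [PySem.Chars.lstrip, PySem.Chars.rstrip]⟩
  | cons c ds ih =>
    intro tok pend sel hc hpend hinv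
    have hcne : c ≠ ',' := by intro he; exact hc (he ▸ List.mem_cons_self ..)
    have hcds : ',' ∉ ds := fun h => hc (List.mem_cons_of_mem _ h)
    by_cases hs : PySem.Chars.isspace c = true
    · by_cases ht : tok = []
      · -- leading whitespace is skipped (pending stays empty)
        subst ht
        have hp : pend = [] := hinv rfl
        subst hp
        have hstep : scanStep (([] : List Char), ([] : List Char), sel) c = ([], [], sel) := by
          simp [scanStep, hcne, hs]
        rw [List.foldl_cons, hstep]
        have := ih [] [] sel hcds (by simp) (fun _ => rfl)
        simpa [PySem.Chars.lstrip, List.dropWhile_cons, hs] using this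
      · -- trailing-or-interior whitespace accumulates in pending
        have hstep : scanStep (tok, pend, sel) c = (tok, pend ++ [c], sel) := by
          simp [scanStep, hcne, hs, ht]
        rw [List.foldl_cons, hstep]
        obtain ⟨pend', hfold⟩ := ih tok (pend ++ [c]) sel hcds
          (by intro x hx; rcases List.mem_append.mp hx with h|h
              · exact hpend x h
              · simpa using (List.mem_singleton.mp h) ▸ hs)
          (fun h => absurd h ht)
        refine ⟨pend', ?_⟩
        rw [hfold]
        simp only [ht, if_false]
        rw [rstrip_cons_space c ds hs]
        by_cases hr : PySem.Chars.rstrip ds = []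
        · simp [hr]
        · simp [hr, PySem.Chars.lower, lowerChar_of_isspace c hs]
    · -- a token character: flush pending into the token, lowercased char appended
      have hstep : scanStep (tok, pend, sel) c
          = (tok ++ pend ++ [PySem.Chars.lowerChar c], [], sel) := by
        simp [scanStep, hcne, hs]
      rw [List.foldl_cons, hstep]
      obtain ⟨pend', hfold⟩ := ih (tok ++ pend ++ [PySem.Chars.lowerChar c]) [] sel hcds
        (by simp) (by simp)
      refine ⟨pend', ?_⟩
      rw [hfold]
      have htne : tok ++ pend ++ [PySem.Chars.lowerChar c] ≠ [] := by simp
      have hlst : PySem.Chars.lstrip (c :: ds) = c :: ds := by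
        simp [PySem.Chars.lstrip, hs]
      have hrst : PySem.Chars.rstrip (c :: ds) = c :: PySem.Chars.rstrip ds :=
        rstrip_cons_nonspace c ds (by simpa using hs)
      by_cases ht : tok = []
      · subst ht
        have hp : pend = [] := hinv rfl
        subst hp
        simp [hlst, hrst, PySem.Chars.lower]
      · simp [ht, hrst, PySem.Chars.lower]

-- PySem.Chars.splitOn with separator "," : its fuelled worker characterized
theorem go_no (l : List Char) :
    ∀ (f : Nat) (cur : List Char) (acc : List (List Char)), l.length < f → ',' ∉ l →
    PySem.Chars.splitOn.go [','] f l cur acc = ((cur.reverse ++ l) :: acc).reverse := by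
  induction l with
  | nil =>
    intro f cur acc hf _
    obtain ⟨f', rfl⟩ := Nat.exists_eq_succ_of_ne_zero (by omega : f ≠ 0)
    rw [PySem.Chars.splitOn.go]
    simp
    omega
  | cons c l ih =>
    intro f cur acc hf hc
    have hcne : c ≠ ',' := by intro he; exact hc (he ▸ List.mem_cons_self ..)
    obtain ⟨f', rfl⟩ := Nat.exists_eq_succ_of_ne_zero (by omega : f ≠ 0)
    rw [PySem.Chars.splitOn.go]
    rw [if_neg (by simp [List.isPrefixOf, Ne.symm hcne])]
    rw [ih f' (c :: cur) acc (by simpa using Nat.lt_of_succ_lt_succ hf)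
      (fun h => hc (List.mem_cons_of_mem _ h))]
    simp

theorem go_acc (f : Nat) :
    ∀ (l cur : List Char) (acc : List (List Char)),
    PySem.Chars.splitOn.go [','] f l cur acc
      = acc.reverse ++ PySem.Chars.splitOn.go [','] f l cur [] := by
  induction f with
  | zero => intro l cur acc; rw [PySem.Chars.splitOn.go, PySem.Chars.splitOn.go]; simp
  | succ f ih =>
    intro l cur acc
    cases l with
    | nil =>
      rw [PySem.Chars.splitOn.go, PySem.Chars.splitOn.go]
      simp
      all_goals omega
    | cons c rest =>
      rw [PySem.Chars.splitOn.go]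
      conv_rhs => rw [PySem.Chars.splitOn.go]
      by_cases hp : List.isPrefixOf [','] (c :: rest) = true
      · simp only [hp, if_true]
        rw [ih, ih (List.drop [','].length (c :: rest)) [] (cur.reverse :: [])]
        simp
      · simp only [Bool.not_eq_true] at hp
        simp only [hp, Bool.false_eq_true, if_false]
        exact ih rest (c :: cur) acc

theorem go_pre (pre : List Char) :
    ∀ (f : Nat) (l cur : List Char) (acc : List (List Char)), ',' ∉ pre →
    PySem.Chars.splitOn.go [','] (f + (pre.length + 1)) (pre ++ ',' :: l) cur acc
      = PySem.Chars.splitOn.go [','] f l [] ((cur.reverse ++ pre) :: acc) := by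
  induction pre with
  | nil =>
    intro f l cur acc _
    rw [show f + (List.length ([] : List Char) + 1) = f + 1 by simp]
    rw [PySem.Chars.splitOn.go.eq_def]
    simp [List.isPrefixOf]
  | cons c pre ih =>
    intro f l cur acc hc
    have hcne : c ≠ ',' := by intro he; exact hc (he ▸ List.mem_cons_self ..)
    rw [show f + ((c :: pre).length + 1) = (f + (pre.length + 1)) + 1 by simp; omega]
    rw [show (c :: pre) ++ ',' :: l = c :: (pre ++ ',' :: l) by simp]
    rw [PySem.Chars.splitOn.go]
    rw [if_neg (by simp [List.isPrefixOf, Ne.symm hcne])]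
    rw [ih f l (c :: cur) acc (fun h => hc (List.mem_cons_of_mem _ h))]
    simp

theorem splitOn_no_comma (cs : List Char) (h : ',' ∉ cs) :
    PySem.Chars.splitOn cs [','] = [cs] := by
  rw [PySem.Chars.splitOn, go_no cs (cs.length + 1) [] [] (by omega) h]
  simp

theorem splitOn_comma (pre rest : List Char) (h : ',' ∉ pre) :
    PySem.Chars.splitOn (pre ++ ',' :: rest) [','] = pre :: PySem.Chars.splitOn rest [','] := by
  rw [PySem.Chars.splitOn]
  rw [show (pre ++ ',' :: rest).length + 1 = (rest.length + 1) + (pre.length + 1) by simp; omega]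
  rw [go_pre pre (rest.length + 1) rest [] [] h, go_acc]
  simp [PySem.Chars.splitOn]

-- A's guard, in Prop form: the emptiness test is redundant ("" is not allowed)
theorem guard_iff (x : String) :
    (¬ x = "" ∧ x ∈ chaosPackTypeValues) ↔ x ∈ chaosPackTypeValues :=
  ⟨fun h => h.2, fun h => ⟨by rintro rfl; revert h; decide, h⟩⟩

-- the normalized token Source B's scanner produces for a comma-free block is
-- exactly A's lower(strip(block)), as a String
theorem norm_eq (cs : List Char) :
    String.ofList ((if PySem.Chars.rstrip (PySem.Chars.lstrip cs) = []
                    then []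
                    else PySem.Chars.lower (PySem.Chars.rstrip (PySem.Chars.lstrip cs))) : List Char)
      = PySem.Str.lower (PySem.Str.strip (String.ofList cs)) := by
  refine String.toList_inj.mp ?_
  by_cases hr : PySem.Chars.rstrip (PySem.Chars.lstrip cs) = [] <;>
    simp [hr, PySem.Chars.strip, PySem.Chars.lower]

-- the scanner's comma transition emits the current token
theorem comma_step (tok pend : List Char) (sel : PySem.Set String) :
    scanStep (tok, pend, sel) ','
      = ([], [],
          if PySem.Set.contains (PySem.Set.ofList chaosPackTypeValues) (String.ofList tok) then
            PySem.Set.add sel (String.ofList tok)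
          else sel) := by
  simp [scanStep]

-- core equivalence: A's fold over the split tokens = Source B's scan of cs ++ [',']
theorem main_loop (n : Nat) :
    ∀ (cs : List Char) (sel : PySem.Set String), cs.length ≤ n →
    (((PySem.Chars.splitOn cs [',']).map String.ofList).foldl
        (fun acc item =>
          let normalized_item := PySem.Str.lower (PySem.Str.strip item)
          if normalized_item != "" &&
              PySem.Set.contains (PySem.Set.ofList chaosPackTypeValues) normalized_item then
            PySem.Set.add acc normalized_item
          else acc)
        sel)
      = ((cs ++ [',']).foldl scanStep ([], [], sel)).2.2 := by
  induction n with
  | zero =>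
    intro cs sel hlen
    have : cs = [] := List.eq_nil_of_length_eq_zero (by omega)
    subst this
    rw [splitOn_no_comma [] (by simp)]
    simp [scanStep, show ("" : String) ∉ chaosPackTypeValues from by decide]
    exact fun hne _ => absurd (by decide) hne
  | succ n ih =>
    intro cs sel hlen
    by_cases hc : ',' ∈ cs
    · -- cs = pre ++ ',' :: rest with ',' ∉ pre (first comma)
      have hd : cs.dropWhile (· != ',') ≠ [] := by
        intro he
        have hl : cs.takeWhile (· != ',') = cs := by
          have := List.takeWhile_append_dropWhile (p := (· != ',')) (l := cs)
          rw [he] at this; simpa using this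
        have := List.mem_takeWhile_imp (l := cs) (p := (· != ',')) (by rw [hl]; exact hc)
        simp at this
      obtain ⟨d, ds, hds⟩ := List.exists_cons_of_ne_nil hd
      have hdc : d = ',' := by
        have := List.head_dropWhile_not (p := (· != ',')) (l := cs) hd
        simp [hds] at this; exact this
      set pre := cs.takeWhile (· != ',') with hpre
      have hsplit : cs = pre ++ ',' :: ds := by
        have := List.takeWhile_append_dropWhile (p := (· != ',')) (l := cs)
        rw [hds, hdc] at this
        exact this.symm
      have hnp : ',' ∉ pre := by
        intro h
        have := List.mem_takeWhile_imp (l := cs) (p := (· != ',')) h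
        simp at this
      have hdslen : ds.length ≤ n := by
        have : cs.length = pre.length + 1 + ds.length := by rw [hsplit]; simp; omega
        omega
      rw [hsplit, splitOn_comma pre ds hnp]
      rw [List.map_cons, List.foldl_cons]
      rw [show (pre ++ ',' :: ds) ++ [','] = pre ++ ([','] ++ (ds ++ [','])) by simp]
      rw [List.foldl_append]
      obtain ⟨pend', hscan⟩ := scan_nocomma pre [] [] sel hnp (by simp) (fun _ => rfl)
      simp only [reduceIte, List.nil_append] at hscan
      rw [hscan]
      rw [List.foldl_append, List.foldl_cons, List.foldl_nil, comma_step, norm_eq pre]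
      rw [← ih ds _ hdslen]
      simp [guard_iff]
    · -- no comma: a single token
      rw [splitOn_no_comma cs hc]
      rw [List.foldl_append]
      obtain ⟨pend', hscan⟩ := scan_nocomma cs [] [] sel hc (by simp) (fun _ => rfl)
      simp only [reduceIte, List.nil_append] at hscan
      rw [hscan, List.foldl_cons, List.foldl_nil, comma_step, norm_eq cs]
      simp [guard_iff]

-- the split?-with-default A uses, in Chars form
theorem split_comma_eq (s : String) :
    (PySem.Str.split? s ",").getD []
      = (PySem.Chars.splitOn s.toList [',']).map String.ofList := by
  have h : (",".toList) = [','] := by decide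
  simp [PySem.Str.split?, PySem.Chars.split?, h]

theorem parse_eq (raw_value : Option String) :
    parse_chaos_pack_types_config raw_value = parse_chaos_pack_types_config_alt raw_value := by
  unfold parse_chaos_pack_types_config parse_chaos_pack_types_config_alt
  dsimp only
  rw [split_comma_eq]
  rw [main_loop ((raw_value.getD "").toList.length) (raw_value.getD "").toList PySem.Set.empty
    (le_refl _)]

-- ===== VERDICT (by name: the statement is the Claim_ definition above) =====
theorem parse_chaos_pack_types_config_spec : Claim_equal_parse_chaos_pack_types_config := by
  intro raw_value _
  exact parse_eq raw_value
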